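-- pv_equiv track=rewrite | github.com/MadhavanVasu/DSA | IQns/replace_palindrome_2.py | findResultantString
-- ===== SOURCE A (Python) =====
-- def findResultantString(s):
--     x = s
--     c = 0
--     p = 0
--     n = len(s)
--     alpha = [0 for i in range(26)]
--     for i in range(n):
--         alpha[ord(s[i])-ord('a')]+=1
--     for i in range(26):
--         if(alpha[i]%2!=0):
--             c+=1
--     d = c//2
--     for i in range(26):
--         if(alpha[i]%2!=0 and d>0):
--             alpha[i]+=1
--             d-=1
--     c = c//2
--     for i in range(25,-1,-1):
--         if(alpha[i]%2!=0 and c>0):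
--             alpha[i]-=1
--             c-=1
--     for i in range(26):
--         if(alpha[i]%2!=0):
--             x = x[:n//2] + chr(i + 97) + x[n//2 + 1 :]
--             alpha[i]-=1
--         for j in range(alpha[i]//2):
--             x = x[:p] + chr(i + 97) + x[p+1:]
--             x = x[:n-p-1] + chr(i+97) + x[n-p:]
--             p+=1
--     return(x)
-- ===== SOURCE B (Python) =====
-- def findResultantString(s):
--     cnt = [0] * 26
--     for ch in s:
--         cnt[(ord(ch) - 97) % 26] += 1
--     odds = [i for i in range(26) if cnt[i] % 2 != 0]
--     k = len(odds) // 2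
--     bump = odds[:k]
--     left = ''.join(chr(i + 97) * (cnt[i] // 2 + (1 if i in bump else 0)) for i in range(26))
--     mid = chr(odds[k] + 97) if len(odds) % 2 != 0 else ''
--     return left + mid + left[::-1]
-- ===== Notes on version B (the rewrite author's own statement) =====
-- stated objective: faster
-- what changed: B replaces A's three mutating adjustment passes and the outside-in two-pointer slice-splicing loop by a direct closed-form construction: count letters, list the odd-count letters, bump the first half of them, build the left half and single middle from the counts, and return left + mid + left[::-1]; A's quadratic per-character string splicing disappears entirely.
import Mathlib
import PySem

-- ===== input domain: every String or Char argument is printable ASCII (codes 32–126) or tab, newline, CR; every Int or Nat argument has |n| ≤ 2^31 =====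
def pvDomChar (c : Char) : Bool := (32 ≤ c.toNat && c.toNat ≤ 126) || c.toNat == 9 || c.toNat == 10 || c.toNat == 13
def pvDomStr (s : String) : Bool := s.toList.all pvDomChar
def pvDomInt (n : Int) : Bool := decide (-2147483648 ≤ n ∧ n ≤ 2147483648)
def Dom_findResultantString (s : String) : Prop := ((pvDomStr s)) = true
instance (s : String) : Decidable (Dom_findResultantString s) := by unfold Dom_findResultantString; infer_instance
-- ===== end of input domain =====

-- B computes the answer in closed form from the letter counts (odd-letter list, bump the
-- first half, build left half + middle and mirror it) instead of A's three mutating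
-- adjustment passes and outside-in mirrored slice writes.

-- ===== PORT A =====
-- alpha[ord(ch)-97] += 1  (Python index may be negative: pySetD/pyGetD wrap exactly)
def pvCountStep (A : List Nat) (ch : Char) : List Nat :=
  PySem.List.pySetD A ((ch.toNat : Int) - 97)
    (PySem.List.pyGetD A ((ch.toNat : Int) - 97) 0 + 1)

def pvCountLoop (cs : List Char) : List Nat :=
  (PySem.List.pyRange 0 (cs.length : Int) 1).foldl
    (fun A i => pvCountStep A (PySem.List.pyGetD cs i 'a'))
    (List.replicate 26 0)

def pvOddCount (alpha : List Nat) : Nat :=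
  (PySem.List.pyRange 0 26 1).foldl
    (fun c i => if PySem.List.pyGetD alpha i 0 % 2 ≠ 0 then c + 1 else c) 0

def pvIncStep (st : List Nat × Nat) (i : Int) : List Nat × Nat :=
  if PySem.List.pyGetD st.1 i 0 % 2 ≠ 0 ∧ st.2 > 0 then
    (PySem.List.pySetD st.1 i (PySem.List.pyGetD st.1 i 0 + 1), st.2 - 1)
  else st

def pvDecStep (st : List Nat × Nat) (i : Int) : List Nat × Nat :=
  if PySem.List.pyGetD st.1 i 0 % 2 ≠ 0 ∧ st.2 > 0 then
    (PySem.List.pySetD st.1 i (PySem.List.pyGetD st.1 i 0 - 1), st.2 - 1)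
  else st

def pvAdjusted (cs : List Char) : List Nat :=
  ((PySem.List.pyRange 25 (-1) (-1)).foldl pvDecStep
    (((PySem.List.pyRange 0 26 1).foldl pvIncStep
        (pvCountLoop cs, pvOddCount (pvCountLoop cs) / 2)).1,
      pvOddCount (pvCountLoop cs) / 2)).1

-- A-side only: x = x[:p] + ch + x[p+1:]; x = x[:n-p-1] + ch + x[n-p:]; p += 1
def pvWrite (n : Nat) (ch : Char) (st : List Char × Nat) : List Char × Nat :=
  let x := PySem.List.slice st.1 none (some ((st.2 : Int))) ++ [ch] ++
           PySem.List.slice st.1 (some ((st.2 : Int) + 1)) none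
  let x := PySem.List.slice x none (some ((n : Int) - (st.2 : Int) - 1)) ++ [ch] ++
           PySem.List.slice x (some ((n : Int) - (st.2 : Int))) none
  (x, st.2 + 1)

-- one iteration of A's final loop (state: x, alpha, p)
def pvStep (n : Nat) (st : List Char × List Nat × Nat) (i : Int) : List Char × List Nat × Nat :=
  let ch := Char.ofNat (i + 97).toNat
  let a := PySem.List.pyGetD st.2.1 i 0
  let xa : List Char × List Nat :=
    if a % 2 ≠ 0 then
      (PySem.List.slice st.1 none (some (PySem.Int.floordiv (n : Int) 2)) ++ [ch] ++
         PySem.List.slice st.1 (some (PySem.Int.floordiv (n : Int) 2 + 1)) none,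
       PySem.List.pySetD st.2.1 i (a - 1))
    else (st.1, st.2.1)
  let k := PySem.List.pyGetD xa.2 i 0 / 2
  let r := (PySem.List.pyRange 0 (k : Int) 1).foldl (fun st _ => pvWrite n ch st) (xa.1, st.2.2)
  (r.1, xa.2, r.2)

def findResultantString (s : String) : String :=
  let x := s.toList
  let n := x.length
  let alpha := pvAdjusted x
  String.ofList ((PySem.List.pyRange 0 26 1).foldl (pvStep n) (x, alpha, 0)).1

-- ===== PORT B =====
-- cnt[(ord(ch) - 97) % 26] += 1  (the % 26 index is always in range, plain list set)
def pvBStep (A : List Nat) (ch : Char) : List Nat :=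
  let i := (PySem.Int.mod ((ch.toNat : Int) - 97) 26).toNat
  A.set i (A.getD i 0 + 1)

def findResultantString_alt (s : String) : String :=
  let cnt := s.toList.foldl pvBStep (List.replicate 26 0)
  let odds := (List.range 26).filter (fun i => cnt.getD i 0 % 2 != 0)
  let k := odds.length / 2
  let bump := odds.take k
  let left := (List.range 26).flatMap
    (fun i => List.replicate (cnt.getD i 0 / 2 + (if i ∈ bump then 1 else 0)) (Char.ofNat (i + 97)))
  let mid := if odds.length % 2 ≠ 0 then [Char.ofNat (odds.getD k 0 + 97)] else []
  String.ofList ((left ++ mid) ++ left.reverse)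

-- ===== PRECONDITION & SPEC =====
-- Pre_ admits exactly the inputs on which A returns: a character with code < 71 or > 122
-- makes alpha[ord(ch)-97] an out-of-range index and A raises IndexError (codes 71..96
-- reach alpha through Python's negative-index wraparound and A returns normally; B maps
-- them to the same bucket with % 26, so they stay inside Pre_).
def Pre_findResultantString (s : String) : Prop :=
  s.toList.all (fun c => 71 ≤ c.toNat && c.toNat ≤ 122) = true
instance (s : String) : Decidable (Pre_findResultantString s) := by
  unfold Pre_findResultantString; infer_instance

def pvWitness_findResultantString : String := "abcb"

def Spec_findResultantString (s : String) (out : String) : Prop := out = findResultantString_alt s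
instance (s : String) (out : String) : Decidable (Spec_findResultantString s out) := by
  unfold Spec_findResultantString; infer_instance

-- ===== CLAIM (what is proved, stated in full; the proofs are below) =====
def Claim_equal_findResultantString : Prop :=
  ∀ (s : String), Dom_findResultantString s → Pre_findResultantString s →
    Spec_findResultantString s (findResultantString s)

-- ===== LEMMAS AND PROOFS =====
-- number of odd counts
def pvCountOdd (l : List Nat) : Nat := l.countP (fun a => a % 2 != 0)

-- left half and middle of the palindrome described by the counts S sitting at letters ≥ j
def pvHalf (j : Nat) : List Nat → List Char
  | [] => []
  | a :: t => List.replicate (a / 2) (Char.ofNat (j + 97)) ++ pvHalf (j + 1) t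

def pvMid (j : Nat) : List Nat → List Char
  | [] => []
  | a :: t => (if a % 2 ≠ 0 then [Char.ofNat (j + 97)] else []) ++ pvMid (j + 1) t

-- indices (from offset j) of the odd entries
def pvOddIdxs (j : Nat) : List Nat → List Nat
  | [] => []
  | a :: t => (if a % 2 ≠ 0 then [j] else []) ++ pvOddIdxs (j + 1) t

-- effect of A's increment pass on the suffix it still has to process, with remaining budget
def pvIncRun : List Nat → Nat → List Nat × Nat
  | [], d => ([], d)
  | a :: t, d =>
      if a % 2 ≠ 0 ∧ d > 0 then
        let r := pvIncRun t (d - 1); ((a + 1) :: r.1, r.2)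
      else
        let r := pvIncRun t d; (a :: r.1, r.2)

-- effect of A's decrement pass, processing the REVERSED list front to back
def pvDecRun : List Nat → Nat → List Nat × Nat
  | [], c => ([], c)
  | a :: t, c =>
      if a % 2 ≠ 0 ∧ c > 0 then
        let r := pvDecRun t (c - 1); ((a - 1) :: r.1, r.2)
      else
        let r := pvDecRun t c; (a :: r.1, r.2)

def pvDecL (X : List Nat) (c : Nat) : List Nat := (pvDecRun X.reverse c).1.reverse

-- left half produced from raw counts, bumping the first d odd entries
def pvHalfBump : List Nat → Nat → Nat → List Char
  | [], _, _ => []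
  | a :: t, j, d =>
      if a % 2 ≠ 0 ∧ d > 0 then
        List.replicate (a / 2 + 1) (Char.ofNat (j + 97)) ++ pvHalfBump t (j + 1) (d - 1)
      else
        List.replicate (a / 2) (Char.ofNat (j + 97)) ++ pvHalfBump t (j + 1) d

lemma pvCountOdd_cons (a : Nat) (l : List Nat) :
    pvCountOdd (a :: l) = pvCountOdd l + (if a % 2 ≠ 0 then 1 else 0) := by
  by_cases h : a % 2 = 0 <;> simp [pvCountOdd, List.countP_cons, h]

lemma pvCountOdd_reverse (l : List Nat) : pvCountOdd l.reverse = pvCountOdd l := by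
  simp [pvCountOdd]

lemma pvCountOdd_sum_parity (l : List Nat) : pvCountOdd l % 2 = l.sum % 2 := by
  induction l with
  | nil => rfl
  | cons a t ih => rw [pvCountOdd_cons]; simp only [List.sum_cons]; split_ifs with h <;> omega

lemma pvMid_eq_nil (j : Nat) (l : List Nat) (h : pvCountOdd l = 0) : pvMid j l = [] := by
  induction l generalizing j with
  | nil => rfl
  | cons a t ih =>
      rw [pvCountOdd_cons] at h
      rw [pvMid, ih _ (by omega)]
      split_ifs with h1 <;> simp_all

lemma pvGetD_mid (P : List Nat) (a : Nat) (T : List Nat) :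
    (P ++ a :: T).getD P.length 0 = a := by
  simp [List.getD]

-- Python in-range index resolves to a Nat index (handles negative wraparound)
lemma pvSet_inrange {α : Type} (A : List α) (j : Int) (v d : α)
    (h1 : -(A.length : Int) ≤ j) (h2 : j < (A.length : Int)) :
    ∃ k, k < A.length ∧ PySem.List.pySetD A j v = A.set k v ∧
      PySem.List.pyGetD A j d = A.getD k d := by
  by_cases h0 : 0 ≤ j
  · refine ⟨j.toNat, by omega, ?_, ?_⟩
    · simp [PySem.List.pySetD, PySem.List.pySet?, PySem.List.pyIdx?, h0, h2]
    · simp [PySem.List.pyGetD, PySem.List.pyGet?, PySem.List.pyIdx?, h0, h2,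
        List.getD_eq_getElem?_getD]
  · refine ⟨A.length - (-j).toNat, by omega, ?_, ?_⟩
    · simp [PySem.List.pySetD, PySem.List.pySet?, PySem.List.pyIdx?, h0, h1]
    · simp [PySem.List.pyGetD, PySem.List.pyGet?, PySem.List.pyIdx?, h0, h1,
        List.getD_eq_getElem?_getD]

lemma pvSum_set_succ (A : List Nat) (k : Nat) (h : k < A.length) :
    (A.set k (A.getD k 0 + 1)).sum = A.sum + 1 := by
  have hA : A.sum = (A.take k).sum + (A[k] + (A.drop (k + 1)).sum) := by
    have h1 := List.sum_take_add_sum_drop A k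
    rw [List.drop_eq_getElem_cons h] at h1
    simp only [List.sum_cons] at h1
    omega
  rw [List.set_eq_take_cons_drop _ h, List.getD_eq_getElem A 0 h]
  simp [List.sum_append]
  omega

lemma pvCountStep_spec (A : List Nat) (ch : Char) (h26 : A.length = 26)
    (hc : 71 ≤ ch.toNat ∧ ch.toNat ≤ 122) :
    (pvCountStep A ch).length = 26 ∧ (pvCountStep A ch).sum = A.sum + 1 := by
  obtain ⟨k, hk, hset, hget⟩ := pvSet_inrange A ((ch.toNat : Int) - 97) (PySem.List.pyGetD A ((ch.toNat : Int) - 97) 0 + 1) 0 (by omega) (by omega)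
  unfold pvCountStep
  rw [hset, hget]
  exact ⟨by simp [h26], by rw [pvSum_set_succ A k hk]⟩

lemma pvCountFold_spec (cs : List Char) :
    ∀ (A : List Nat), A.length = 26 → (∀ c ∈ cs, 71 ≤ c.toNat ∧ c.toNat ≤ 122) →
      (cs.foldl pvCountStep A).length = 26 ∧ (cs.foldl pvCountStep A).sum = A.sum + cs.length := by
  induction cs with
  | nil => intro A h _; exact ⟨h, rfl⟩
  | cons ch t ih =>
      intro A h hc
      obtain ⟨hl, hs⟩ := pvCountStep_spec A ch h (hc ch (by simp))
      obtain ⟨ihl, ihs⟩ := ih (pvCountStep A ch) hl (fun c hcm => hc c (by simp [hcm]))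
      refine ⟨ihl, ?_⟩
      rw [List.foldl_cons] at *
      rw [ihs, hs]
      simp
      omega

lemma pvCountLoop_eq_foldl (cs : List Char) :
    pvCountLoop cs = cs.foldl pvCountStep (List.replicate 26 0) := by
  unfold pvCountLoop
  rw [PySem.List.foldl_pyRange_zero_pyGetD' cs 'a' pvCountStep (List.replicate 26 0)]

lemma pvCountLoop_spec (cs : List Char) (h : ∀ c ∈ cs, 71 ≤ c.toNat ∧ c.toNat ≤ 122) :
    (pvCountLoop cs).length = 26 ∧ (pvCountLoop cs).sum = cs.length := by
  rw [pvCountLoop_eq_foldl]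
  have := pvCountFold_spec cs (List.replicate 26 0) (by simp) h
  simpa using this

-- in-range Python index, split in the two explicit forms
lemma pvSetD_pos {α : Type} (A : List α) (j : Int) (v : α) (h0 : 0 ≤ j)
    (h2 : j < (A.length : Int)) : PySem.List.pySetD A j v = A.set j.toNat v := by
  simp [PySem.List.pySetD, PySem.List.pySet?, PySem.List.pyIdx?, h0, h2]

lemma pvGetD_pos {α : Type} (A : List α) (j : Int) (d : α) (h0 : 0 ≤ j)
    (h2 : j < (A.length : Int)) : PySem.List.pyGetD A j d = A.getD j.toNat d := by
  simp [PySem.List.pyGetD, PySem.List.pyGet?, PySem.List.pyIdx?, h0, h2,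
    List.getD_eq_getElem?_getD]

lemma pvSetD_neg {α : Type} (A : List α) (j : Int) (v : α) (h0 : ¬ 0 ≤ j)
    (h1 : -(A.length : Int) ≤ j) :
    PySem.List.pySetD A j v = A.set (A.length - (-j).toNat) v := by
  simp [PySem.List.pySetD, PySem.List.pySet?, PySem.List.pyIdx?, h0, h1]

lemma pvGetD_neg {α : Type} (A : List α) (j : Int) (d : α) (h0 : ¬ 0 ≤ j)
    (h1 : -(A.length : Int) ≤ j) :
    PySem.List.pyGetD A j d = A.getD (A.length - (-j).toNat) d := by
  simp [PySem.List.pyGetD, PySem.List.pyGet?, PySem.List.pyIdx?, h0, h1,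
    List.getD_eq_getElem?_getD]

-- B's counting step is A's counting step on a length-26 array and an admitted character
lemma pvBStep_eq (A : List Nat) (ch : Char) (h26 : A.length = 26)
    (hc : 71 ≤ ch.toNat ∧ ch.toNat ≤ 122) : pvBStep A ch = pvCountStep A ch := by
  have hmod : PySem.Int.mod ((ch.toNat : Int) - 97) 26
      = ((ch.toNat : Int) - 97) % 26 := PySem.Int.mod_eq_emod_of_pos (by norm_num)
  unfold pvBStep pvCountStep
  dsimp only
  by_cases h0 : 0 ≤ (ch.toNat : Int) - 97
  · have hK : (PySem.Int.mod ((ch.toNat : Int) - 97) 26).toNat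
        = ((ch.toNat : Int) - 97).toNat := by rw [hmod]; omega
    rw [hK, pvSetD_pos A _ _ h0 (by omega), pvGetD_pos A _ _ h0 (by omega)]
  · have hK : (PySem.Int.mod ((ch.toNat : Int) - 97) 26).toNat
        = A.length - (-((ch.toNat : Int) - 97)).toNat := by rw [hmod]; omega
    rw [hK, pvSetD_neg A _ _ h0 (by omega), pvGetD_neg A _ _ h0 (by omega)]

lemma pvBFold_eq (cs : List Char) :
    ∀ (A : List Nat), A.length = 26 → (∀ c ∈ cs, 71 ≤ c.toNat ∧ c.toNat ≤ 122) →
      cs.foldl pvBStep A = cs.foldl pvCountStep A := by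
  induction cs with
  | nil => intro A _ _; rfl
  | cons ch t ih =>
      intro A h26 hc
      rw [List.foldl_cons, List.foldl_cons, pvBStep_eq A ch h26 (hc ch (by simp))]
      exact ih (pvCountStep A ch) (pvCountStep_spec A ch h26 (hc ch (by simp))).1
        (fun c hcm => hc c (by simp [hcm]))

lemma pvBCount_eq (cs : List Char) (h : ∀ c ∈ cs, 71 ≤ c.toNat ∧ c.toNat ≤ 122) :
    cs.foldl pvBStep (List.replicate 26 0) = pvCountLoop cs := by
  rw [pvCountLoop_eq_foldl]
  exact pvBFold_eq cs (List.replicate 26 0) (by simp) h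

-- pvOddCount is pvCountOdd
lemma pvOdd_aux :
    ∀ (S P A : List Nat) (c₀ : Nat), A = P ++ S → A.length = 26 →
      (PySem.List.pyRange (P.length : Int) 26 1).foldl
          (fun c i => if PySem.List.pyGetD A i 0 % 2 ≠ 0 then c + 1 else c) c₀
        = c₀ + pvCountOdd S := by
  intro S
  induction S with
  | nil =>
      intro P A c₀ hA h26
      have : (P.length : Int) = 26 := by subst hA; simp at h26 ⊢; omega
      rw [this, PySem.List.pyRange_one_eq_nil (le_refl 26)]
      simp [pvCountOdd]
  | cons a T ih =>
      intro P A c₀ hA h26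
      have hP : P.length + (a :: T).length = 26 := by
        subst hA; simp at h26 ⊢; omega
      have hlt : (P.length : Int) < 26 := by simp at hP; omega
      rw [PySem.List.pyRange_one_cons hlt, List.foldl_cons]
      have hget : PySem.List.pyGetD A (P.length : Int) 0 = a := by
        rw [PySem.List.pyGetD_natCast, hA, pvGetD_mid]
      have hcast : (P.length : Int) + 1 = (((P ++ [a]).length : Nat) : Int) := by
        simp
      rw [hget, hcast]
      have ihx := ih (P ++ [a]) A (if a % 2 ≠ 0 then c₀ + 1 else c₀) (by simp [hA]) h26
      rw [ihx, pvCountOdd_cons]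
      split_ifs with hodd <;> omega

-- ---- characterisation of A's increment pass ----
lemma pvIncFold :
    ∀ (S P : List Nat) (d : Nat), P.length + S.length = 26 →
      (PySem.List.pyRange (P.length : Int) 26 1).foldl pvIncStep (P ++ S, d)
        = (P ++ (pvIncRun S d).1, (pvIncRun S d).2) := by
  intro S
  induction S with
  | nil =>
      intro P d h26
      have : (P.length : Int) = 26 := by simp at h26; omega
      rw [this, PySem.List.pyRange_one_eq_nil (le_refl 26)]
      simp [pvIncRun]
  | cons a T ih =>
      intro P d h26
      have hlt : (P.length : Int) < 26 := by simp at h26; omega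
      rw [PySem.List.pyRange_one_cons hlt, List.foldl_cons]
      have hget : PySem.List.pyGetD (P ++ a :: T) (P.length : Int) 0 = a := by
        rw [PySem.List.pyGetD_natCast, pvGetD_mid]
      have hcast : (P.length : Int) + 1 = (((P ++ [a]).length : Nat) : Int) := by simp
      by_cases hcond : a % 2 ≠ 0 ∧ d > 0
      · have hstep : pvIncStep (P ++ a :: T, d) (P.length : Int)
            = ((P ++ [a + 1]) ++ T, d - 1) := by
          unfold pvIncStep
          rw [if_pos (by exact ⟨by simpa [hget] using hcond.1, hcond.2⟩)]
          simp only [hget]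
          rw [PySem.List.pySetD_natCast]
          congr 1
          rw [List.set_append_right _ _ (le_refl _)]
          simp
        rw [hstep,
          show (P.length : Int) + 1 = (((P ++ [a + 1]).length : Nat) : Int) by simp,
          ih (P ++ [a + 1]) (d - 1) (by simp at h26 ⊢; omega)]
        rw [pvIncRun, if_pos hcond]
        simp
      · have hstep : pvIncStep (P ++ a :: T, d) (P.length : Int) = ((P ++ [a]) ++ T, d) := by
          unfold pvIncStep
          rw [if_neg (by rw [hget]; exact hcond)]
          simp
        rw [hstep, hcast, ih (P ++ [a]) d (by simp at h26 ⊢; omega)]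
        rw [pvIncRun, if_neg hcond]
        simp

-- ---- characterisation of A's decrement pass ----
lemma pvDecFold (S : List Nat) :
    ∀ (P : List Nat) (c : Nat),
      (PySem.List.pyRange ((S.length : Int) - 1) (-1) (-1)).foldl pvDecStep (S ++ P, c)
        = ((pvDecRun S.reverse c).1.reverse ++ P, (pvDecRun S.reverse c).2) := by
  induction S using List.reverseRecOn with
  | nil =>
      intro P c
      rw [show ((([] : List Nat).length : Int) - 1) = -1 by simp,
        PySem.List.pyRange_neg_one_eq_nil (le_refl (-1))]
      simp [pvDecRun]
  | append_singleton T a ih =>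
      intro P c
      have hlen : (((T ++ [a]).length : Int) - 1) = (T.length : Int) := by simp
      have hassoc : (T ++ [a]) ++ P = T ++ a :: P := by simp
      rw [hlen, hassoc, PySem.List.pyRange_neg_one_cons (by omega), List.foldl_cons]
      have hget : PySem.List.pyGetD (T ++ a :: P) (T.length : Int) 0 = a := by
        rw [PySem.List.pyGetD_natCast, pvGetD_mid]
      have hrev : (T ++ [a]).reverse = a :: T.reverse := by simp
      by_cases hcond : a % 2 ≠ 0 ∧ c > 0
      · have hstep : pvDecStep (T ++ a :: P, c) (T.length : Int) = (T ++ (a - 1) :: P, c - 1) := by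
          unfold pvDecStep
          rw [if_pos (by exact ⟨by simpa [hget] using hcond.1, hcond.2⟩)]
          simp only [hget]
          rw [PySem.List.pySetD_natCast]
          congr 1
          rw [List.set_append_right _ _ (le_refl _)]
          simp
        rw [hstep, ih ((a - 1) :: P) (c - 1), hrev, pvDecRun, if_pos hcond]
        simp
      · have hstep : pvDecStep (T ++ a :: P, c) (T.length : Int) = (T ++ a :: P, c) := by
          unfold pvDecStep
          rw [if_neg (by rw [hget]; exact hcond)]
        rw [hstep, ih (a :: P) c, hrev, pvDecRun, if_neg hcond]
        simp


lemma pvIncRun_length (S : List Nat) : ∀ d, (pvIncRun S d).1.length = S.length := by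
  induction S with
  | nil => intro d; simp [pvIncRun]
  | cons a t ih =>
      intro d
      rw [pvIncRun]
      split_ifs <;> simp [ih]

-- A's whole adjustment is: increment pass (pvIncRun), then decrement pass (pvDecL)
lemma pvAdjusted_eq (cs : List Char) (h26 : (pvCountLoop cs).length = 26) :
    pvAdjusted cs
      = pvDecL (pvIncRun (pvCountLoop cs) (pvOddCount (pvCountLoop cs) / 2)).1
          (pvOddCount (pvCountLoop cs) / 2) := by
  unfold pvAdjusted
  have hinc := pvIncFold (pvCountLoop cs) [] (pvOddCount (pvCountLoop cs) / 2)
    (by simpa using h26)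
  simp only [List.nil_append, List.length_nil, Nat.cast_zero] at hinc
  rw [hinc]
  have hlen : ((pvIncRun (pvCountLoop cs) (pvOddCount (pvCountLoop cs) / 2)).1.length : Int) - 1
      = 25 := by
    rw [pvIncRun_length]
    rw [h26]; norm_num
  rw [show (25 : Int) = ((pvIncRun (pvCountLoop cs) (pvOddCount (pvCountLoop cs) / 2)).1.length : Int) - 1 from hlen.symm]
  have hdec := pvDecFold (pvIncRun (pvCountLoop cs) (pvOddCount (pvCountLoop cs) / 2)).1 []
    (pvOddCount (pvCountLoop cs) / 2)
  simp only [List.append_nil] at hdec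
  dsimp only
  rw [hdec]
  simp [pvDecL]


lemma pvDecRun_length (l : List Nat) : ∀ c, (pvDecRun l c).1.length = l.length := by
  induction l with
  | nil => intro c; simp [pvDecRun]
  | cons a t ih =>
      intro c
      rw [pvDecRun]
      split_ifs <;> simp [ih]

lemma pvDecL_length (X : List Nat) (c : Nat) : (pvDecL X c).length = X.length := by
  simp [pvDecL, pvDecRun_length]

lemma pvOddIdxs_append (X Y : List Nat) :
    ∀ j, pvOddIdxs j (X ++ Y) = pvOddIdxs j X ++ pvOddIdxs (j + X.length) Y := by
  induction X with
  | nil => intro j; simp [pvOddIdxs]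
  | cons a t ih =>
      intro j
      rw [List.cons_append, pvOddIdxs, pvOddIdxs, ih (j + 1)]
      simp only [List.length_cons]
      rw [show j + 1 + t.length = j + (t.length + 1) by omega]
      split_ifs <;> simp

lemma pvOddIdxs_ge (S : List Nat) : ∀ j i, i ∈ pvOddIdxs j S → j ≤ i := by
  induction S with
  | nil => intro j i h; simp [pvOddIdxs] at h
  | cons a t ih =>
      intro j i h
      rw [pvOddIdxs] at h
      rcases List.mem_append.mp h with h1 | h2
      · split_ifs at h1 with hc
        · simp at h1; omega
        · simp at h1
      · have := ih (j + 1) i h2; omega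

lemma pvOddIdxs_length (S : List Nat) : ∀ j, (pvOddIdxs j S).length = pvCountOdd S := by
  induction S with
  | nil => intro j; simp [pvOddIdxs, pvCountOdd]
  | cons a t ih =>
      intro j
      rw [pvOddIdxs, pvCountOdd_cons]
      split_ifs <;> simp [ih]

lemma pvMid_eq_map (S : List Nat) :
    ∀ j, pvMid j S = (pvOddIdxs j S).map (fun i => Char.ofNat (i + 97)) := by
  induction S with
  | nil => intro j; simp [pvMid, pvOddIdxs]
  | cons a t ih =>
      intro j
      rw [pvMid, pvOddIdxs, ih (j + 1)]
      split_ifs <;> simp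

-- the increment pass makes the first d odd entries even: odd indices lose their first d
lemma pvOddIdxs_pvIncRun (S : List Nat) :
    ∀ j d, pvOddIdxs j (pvIncRun S d).1 = (pvOddIdxs j S).drop d := by
  induction S with
  | nil => intro j d; simp [pvIncRun, pvOddIdxs]
  | cons a t ih =>
      intro j d
      by_cases hc : a % 2 ≠ 0 ∧ d > 0
      · obtain ⟨ha, hd⟩ := hc
        rw [pvIncRun, if_pos ⟨ha, hd⟩]
        show pvOddIdxs j ((a + 1) :: (pvIncRun t (d - 1)).1) = _
        rw [pvOddIdxs, if_neg (by omega), pvOddIdxs, if_pos ha, ih (j + 1) (d - 1)]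
        rcases Nat.exists_eq_succ_of_ne_zero (by omega : d ≠ 0) with ⟨d', rfl⟩
        simp
      · rw [pvIncRun, if_neg hc]
        show pvOddIdxs j (a :: (pvIncRun t d).1) = _
        by_cases ha : a % 2 ≠ 0
        · have hd : d = 0 := by omega
          subst hd
          simp [pvOddIdxs, ha, ih]
        · simp [pvOddIdxs, ha, ih]

lemma pvDecL_append_singleton (T : List Nat) (a : Nat) (c : Nat) :
    pvDecL (T ++ [a]) c
      = if a % 2 ≠ 0 ∧ c > 0 then pvDecL T (c - 1) ++ [a - 1] else pvDecL T c ++ [a] := by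
  unfold pvDecL
  rw [List.reverse_append]
  simp only [List.reverse_cons, List.reverse_nil, List.nil_append, List.singleton_append]
  rw [pvDecRun]
  split_ifs with hc <;> simp

-- the decrement pass makes the last c odd entries even: odd indices lose their last c
lemma pvOddIdxs_pvDecL (X : List Nat) :
    ∀ c j, pvOddIdxs j (pvDecL X c)
      = (pvOddIdxs j X).take ((pvOddIdxs j X).length - c) := by
  induction X using List.reverseRecOn with
  | nil => intro c j; simp [pvDecL, pvDecRun, pvOddIdxs]
  | append_singleton T a ih =>
      intro c j
      rw [pvDecL_append_singleton, pvOddIdxs_append T [a] j]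
      split_ifs with hc
      · obtain ⟨ha, hc0⟩ := hc
        rw [pvOddIdxs_append, pvDecL_length, ih (c - 1) j]
        rw [show pvOddIdxs (j + T.length) [a - 1] = [] by
          simp [pvOddIdxs]; omega]
        rw [show pvOddIdxs (j + T.length) [a] = [j + T.length] by
          simp [pvOddIdxs, ha]]
        rw [List.append_nil, List.length_append]
        rw [List.take_append_of_le_length (by simp; omega)]
        congr 1
        simp
        omega
      · rw [pvOddIdxs_append, ih c j, pvDecL_length]
        by_cases ha : a % 2 ≠ 0
        · have hc0 : c = 0 := by omega
          subst hc0
          rw [show pvOddIdxs (j + T.length) [a] = [j + T.length] by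
            simp [pvOddIdxs, ha]]
          simp
        · rw [show pvOddIdxs (j + T.length) [a] = [] by simp [pvOddIdxs, ha]]
          simp

lemma pvIncRun_sum (S : List Nat) :
    ∀ d, (pvIncRun S d).1.sum = S.sum + min d (pvCountOdd S) := by
  induction S with
  | nil => intro d; simp [pvIncRun, pvCountOdd]
  | cons a t ih =>
      intro d
      rw [pvCountOdd_cons]
      by_cases hc : a % 2 ≠ 0 ∧ d > 0
      · rw [pvIncRun, if_pos hc, if_pos hc.1]
        show ((a + 1) :: (pvIncRun t (d - 1)).1).sum = (a :: t).sum + min d (pvCountOdd t + 1)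
        rw [List.sum_cons, List.sum_cons, ih (d - 1)]
        have := hc.2
        omega
      · rw [pvIncRun, if_neg hc]
        show (a :: (pvIncRun t d).1).sum = (a :: t).sum + _
        rw [List.sum_cons, List.sum_cons, ih d]
        by_cases ha : a % 2 ≠ 0
        · rw [if_pos ha]
          have : d = 0 := by omega
          subst this
          simp
        · rw [if_neg ha]
          omega

lemma pvDecRun_sum (l : List Nat) :
    ∀ c, (pvDecRun l c).1.sum + min c (pvCountOdd l) = l.sum := by
  induction l with
  | nil => intro c; simp [pvDecRun, pvCountOdd]
  | cons a t ih =>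
      intro c
      rw [pvCountOdd_cons]
      by_cases hc : a % 2 ≠ 0 ∧ c > 0
      · rw [pvDecRun, if_pos hc, if_pos hc.1]
        show ((a - 1) :: (pvDecRun t (c - 1)).1).sum + min c (pvCountOdd t + 1) = (a :: t).sum
        rw [List.sum_cons, List.sum_cons]
        have ihc := ih (c - 1)
        have ha1 : 1 ≤ a := by have := hc.1; omega
        have := hc.2
        omega
      · rw [pvDecRun, if_neg hc]
        show (a :: (pvDecRun t c).1).sum + _ = (a :: t).sum
        rw [List.sum_cons, List.sum_cons]
        have ihc := ih c
        by_cases ha : a % 2 ≠ 0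
        · rw [if_pos ha]
          have : c = 0 := by omega
          subst this
          simp at ihc ⊢
          omega
        · rw [if_neg ha]
          omega

lemma pvDecL_sum (X : List Nat) (c : Nat) :
    (pvDecL X c).sum + min c (pvCountOdd X) = X.sum := by
  unfold pvDecL
  rw [List.sum_reverse]
  have h := pvDecRun_sum X.reverse c
  rw [pvCountOdd_reverse, List.sum_reverse] at h
  exact h

-- the decrement pass never changes any entry's half (it only turns odd a into a - 1)
lemma pvDecRun_halves (l : List Nat) :
    ∀ c, List.Forall₂ (fun a b => b / 2 = a / 2) l (pvDecRun l c).1 := by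
  induction l with
  | nil => intro c; simp [pvDecRun]
  | cons a t ih =>
      intro c
      rw [pvDecRun]
      split_ifs with hc
      · exact List.Forall₂.cons (by have := hc.1; omega) (ih (c - 1))
      · exact List.Forall₂.cons rfl (ih c)

lemma pvHalf_congr : ∀ (X Y : List Nat) (j : Nat),
    List.Forall₂ (fun a b => b / 2 = a / 2) X Y → pvHalf j Y = pvHalf j X := by
  intro X Y j h
  induction h generalizing j with
  | nil => rfl
  | cons hab htail ih =>
      rw [pvHalf, pvHalf, hab, ih]

lemma pvHalf_pvDecL (X : List Nat) (c : Nat) (j : Nat) :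
    pvHalf j (pvDecL X c) = pvHalf j X := by
  unfold pvDecL
  apply pvHalf_congr
  have h := pvDecRun_halves X.reverse c
  have h2 := List.forall₂_reverse_iff.mpr h
  simpa using h2

lemma pvHalf_pvIncRun (S : List Nat) :
    ∀ j d, pvHalf j (pvIncRun S d).1 = pvHalfBump S j d := by
  induction S with
  | nil => intro j d; simp [pvIncRun, pvHalf, pvHalfBump]
  | cons a t ih =>
      intro j d
      rw [pvIncRun, pvHalfBump]
      split_ifs with hc
      · simp only
        rw [pvHalf, ih (j + 1) (d - 1)]
        have := hc.1
        rw [show (a + 1) / 2 = a / 2 + 1 by omega]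
      · simp only
        rw [pvHalf, ih (j + 1) d]

-- B's odds list is the odd-index list of the count array
lemma pvFilter_eq (A : List Nat) :
    ∀ (S P : List Nat), A = P ++ S →
      ((List.range' P.length S.length).filter (fun i => A.getD i 0 % 2 != 0))
        = pvOddIdxs P.length S := by
  intro S
  induction S with
  | nil => intro P _; simp [pvOddIdxs]
  | cons a T ih =>
      intro P hA
      rw [List.length_cons, List.range'_succ, List.filter_cons]
      have h1 : A.getD P.length 0 = a := by rw [hA]; exact pvGetD_mid P a T
      have h2 := ih (P ++ [a]) (by simp [hA])
      simp only [List.length_append, List.length_cons, List.length_nil] at h2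
      rw [pvOddIdxs, h1]
      by_cases h : a % 2 = 0
      · rw [if_neg (by simp [h]), if_neg (by simp [h]), List.nil_append]
        exact h2
      · rw [if_pos (by simp [Nat.mod_two_ne_zero.mp h]), if_pos h]
        rw [h2]
        rfl

-- B's left-half comprehension equals the bump construction
lemma pvLeft_bridge (A : List Nat) :
    ∀ (S P : List Nat) (d : Nat), A = P ++ S →
      (List.range' P.length S.length).flatMap
          (fun i => List.replicate
            (A.getD i 0 / 2 + (if i ∈ (pvOddIdxs P.length S).take d then 1 else 0))
            (Char.ofNat (i + 97)))
        = pvHalfBump S P.length d := by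
  intro S
  induction S with
  | nil => intro P d _; simp [pvHalfBump]
  | cons a T ih =>
      intro P d hA
      have hget : A.getD P.length 0 = a := by rw [hA]; exact pvGetD_mid P a T
      have hO' : ∀ i ∈ pvOddIdxs (P.length + 1) T, P.length + 1 ≤ i :=
        fun i hi => pvOddIdxs_ge T (P.length + 1) i hi
      have htail : ∀ (d' : Nat),
          (List.range' (P.length + 1) T.length).flatMap
              (fun i => List.replicate
                (A.getD i 0 / 2 + (if i ∈ (pvOddIdxs (P.length + 1) T).take d' then 1 else 0))
                (Char.ofNat (i + 97)))
            = pvHalfBump T (P.length + 1) d' := by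
        intro d'
        have h2 := ih (P ++ [a]) d' (by simp [hA])
        simpa using h2
      rw [List.length_cons, List.range'_succ, List.flatMap_cons, hget]
      by_cases ha : a % 2 ≠ 0
      · have hOdd : pvOddIdxs P.length (a :: T)
            = P.length :: pvOddIdxs (P.length + 1) T := by
          rw [pvOddIdxs, if_pos ha, List.singleton_append]
        by_cases hd : d > 0
        · rcases Nat.exists_eq_succ_of_ne_zero (by omega : d ≠ 0) with ⟨d', rfl⟩
          have hOdd2 : (pvOddIdxs P.length (a :: T)).take (d' + 1)
              = P.length :: (pvOddIdxs (P.length + 1) T).take d' := by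
            rw [hOdd, List.take_succ_cons]
          simp only [hOdd2]
          rw [if_pos List.mem_cons_self, pvHalfBump, if_pos ⟨ha, hd⟩]
          simp only [Nat.succ_sub_one]
          congr 1
          rw [← htail d']
          apply List.flatMap_congr
          intro i hi
          have hge : P.length + 1 ≤ i := List.left_le_of_mem_range' hi
          have hmem : (i ∈ P.length :: (pvOddIdxs (P.length + 1) T).take d')
              ↔ i ∈ (pvOddIdxs (P.length + 1) T).take d' := by
            simp only [List.mem_cons]
            constructor
            · rintro (h | h)
              · omega
              · exact h
            · exact fun h => Or.inr h
          rw [if_congr hmem rfl rfl]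
        · have hd0 : d = 0 := by omega
          subst hd0
          simp only [List.take_zero, List.not_mem_nil, if_false]
          rw [pvHalfBump, if_neg (by omega)]
          congr 1
          have h0 := htail 0
          simpa using h0
      · have hOdd : pvOddIdxs P.length (a :: T) = pvOddIdxs (P.length + 1) T := by
          rw [pvOddIdxs, if_neg ha, List.nil_append]
        simp only [hOdd]
        rw [if_neg (fun hmem => by
          have := hO' P.length (List.mem_of_mem_take hmem)
          omega)]
        rw [pvHalfBump, if_neg (by tauto)]
        congr 1
        exact htail d


-- ---- A's final loop: mirrored writes (unchanged analysis of port A) ----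
-- one pvWrite on a symmetric split: writes ch at both ends of the middle region C
lemma pvWrite_step (n : Nat) (ch : Char) (L C R : List Char) (h1 : R.length = L.length)
    (h2 : 2 ≤ C.length) (h3 : n = L.length + C.length + R.length) :
    pvWrite n ch (L ++ C ++ R, L.length)
      = ((L ++ [ch]) ++ (C.drop 1).take (C.length - 2) ++ ([ch] ++ R), L.length + 1) := by
  unfold pvWrite
  dsimp only
  have e1 : PySem.List.slice (L ++ C ++ R) none (some ((L.length : Nat) : Int)) = L := by
    rw [PySem.List.slice_to_natCast, List.append_assoc, List.take_left]
  have e2 : PySem.List.slice (L ++ C ++ R) (some (((L.length : Nat) : Int) + 1)) none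
      = C.drop 1 ++ R := by
    rw [show ((L.length : Int) + 1) = ((L.length + 1 : Nat) : Int) by push_cast; ring,
      PySem.List.slice_from_natCast, List.append_assoc, List.drop_length_add_append 1,
      List.drop_append_of_le_length (by omega)]
  rw [e1, e2]
  have e3 : PySem.List.slice (L ++ [ch] ++ (C.drop 1 ++ R)) none
        (some ((n : Int) - (L.length : Int) - 1))
      = (L ++ [ch]) ++ (C.drop 1).take (C.length - 2) := by
    rw [show ((n : Int) - (L.length : Int) - 1)
        = (((L.length + 1) + (C.length - 2) : Nat) : Int) by omega,
      PySem.List.slice_to_natCast,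
      show (L.length + 1 + (C.length - 2)) = (L ++ [ch]).length + (C.length - 2) by simp]
    rw [List.take_length_add_append, List.take_append_of_le_length (by simp; omega)]
  have e4 : PySem.List.slice (L ++ [ch] ++ (C.drop 1 ++ R)) (some ((n : Int) - (L.length : Int))) none
      = R := by
    rw [show ((n : Int) - (L.length : Int)) = (((L.length + 1) + (C.length - 1) : Nat) : Int) by
        omega,
      PySem.List.slice_from_natCast,
      show (L.length + 1 + (C.length - 1)) = (L ++ [ch]).length + (C.length - 1) by simp,
      List.drop_length_add_append, List.drop_append_of_le_length (by simp),
      List.drop_eq_nil_of_le (by simp), List.nil_append]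
  rw [e3, e4]
  simp [List.append_assoc]

-- m pvWrites fill the outer m slots on each side of the middle region M
lemma pvWrite_loop (n : Nat) (ch : Char) :
    ∀ (m : Nat) (L M R : List Char), R.length = L.length → 2 * m ≤ M.length →
      n = L.length + M.length + R.length →
      (PySem.List.pyRange 0 (m : Int) 1).foldl (fun st _ => pvWrite n ch st) (L ++ M ++ R, L.length)
        = ((L ++ List.replicate m ch) ++ (M.drop m).take (M.length - 2 * m)
             ++ (List.replicate m ch ++ R), L.length + m) := by
  intro m
  induction m with
  | zero =>
      intro L M R h1 h2 h3
      simp [PySem.List.pyRange_one_eq_nil]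
  | succ m ih =>
      intro L M R h1 h2 h3
      rw [show ((m + 1 : Nat) : Int) = (m : Int) + 1 by push_cast; ring,
        PySem.List.pyRange_one_succ_right (by positivity), List.foldl_append,
        ih L M R h1 (by omega) h3, List.foldl_cons, List.foldl_nil]
      rw [show L.length + m = (L ++ List.replicate m ch).length by simp]
      rw [pvWrite_step n ch (L ++ List.replicate m ch)
        ((M.drop m).take (M.length - 2 * m)) (List.replicate m ch ++ R)
        (by simp [h1]; omega) (by simp [List.length_take, List.length_drop]; omega)
        (by simp [List.length_take, List.length_drop, h1]; omega)]
      congr 1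
      · rw [List.drop_take, List.drop_drop]
        simp only [List.length_take, List.length_drop]
        rw [show ((M.length - 2 * m) ⊓ (M.length - m) - 2) = M.length - 2 * (m + 1) by omega,
          show (M.length - 2 * m - 1) = M.length - 2 * (m + 1) + 1 by omega]
        rw [List.take_take,
          show (M.length - 2 * (m + 1)) ⊓ (M.length - 2 * (m + 1) + 1) = M.length - 2 * (m + 1) by
            omega]
        rw [show ([ch] ++ (List.replicate m ch ++ R)) = List.replicate (m + 1) ch ++ R by
          simp [List.replicate_succ]]
        rw [List.replicate_succ']
        simp [List.append_assoc]
      · simp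
        omega

-- pvStep at an even count: no mid write, alpha unchanged, a/2 pair writes
lemma pvStep_even (n : Nat) (P : List Nat) (a : Nat) (T : List Nat) (x : List Char) (p : Nat)
    (ha : a % 2 = 0) :
    pvStep n (x, P ++ a :: T, p) (P.length : Int)
      = (((PySem.List.pyRange 0 ((a / 2 : Nat) : Int) 1).foldl
            (fun st _ => pvWrite n (Char.ofNat (P.length + 97)) st) (x, p)).1,
         P ++ a :: T,
         ((PySem.List.pyRange 0 ((a / 2 : Nat) : Int) 1).foldl
            (fun st _ => pvWrite n (Char.ofNat (P.length + 97)) st) (x, p)).2) := by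
  unfold pvStep
  dsimp only
  rw [PySem.List.pyGetD_natCast, pvGetD_mid, if_neg (by omega)]
  dsimp only
  rw [PySem.List.pyGetD_natCast, pvGetD_mid,
    show (((P.length : Int)) + 97).toNat = P.length + 97 by omega]

-- pvStep at an odd count equals pvStep after the explicit mid write on count a-1
lemma pvStep_odd (n : Nat) (P : List Nat) (a : Nat) (T : List Nat) (x : List Char) (p : Nat)
    (ha : a % 2 = 1) :
    pvStep n (x, P ++ a :: T, p) (P.length : Int)
      = pvStep n
          (PySem.List.slice x none (some (PySem.Int.floordiv (n : Int) 2)) ++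
             [Char.ofNat (P.length + 97)] ++
             PySem.List.slice x (some (PySem.Int.floordiv (n : Int) 2 + 1)) none,
           P ++ (a - 1) :: T, p) (P.length : Int) := by
  unfold pvStep
  dsimp only
  simp only [PySem.List.pyGetD_natCast, pvGetD_mid]
  rw [if_pos (by omega : a % 2 ≠ 0), if_neg (by omega : ¬ (a - 1) % 2 ≠ 0)]
  dsimp only
  rw [PySem.List.pySetD_natCast, List.set_append_right _ _ (le_refl _)]
  simp only [Nat.sub_self, List.set_cons_zero]
  simp only [pvGetD_mid,
    show (((P.length : Int)) + 97).toNat = P.length + 97 by omega]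

-- all remaining counts even: the loop wraps the untouched centre C symmetrically
lemma pvEven_aux (n : Nat) :
    ∀ (S P : List Nat) (L F C G : List Char),
      P.length + S.length = 26 → pvCountOdd S = 0 →
      F.length = S.sum / 2 → G.length = S.sum / 2 →
      n = 2 * L.length + (F.length + C.length + G.length) →
      ((PySem.List.pyRange (P.length : Int) 26 1).foldl (pvStep n)
          (L ++ (F ++ C ++ G) ++ L.reverse, P ++ S, L.length)).1
        = L ++ pvHalf P.length S ++ C ++ (pvHalf P.length S).reverse ++ L.reverse := by
  intro S
  induction S with
  | nil =>
      intro P L F C G h26 _ hF hG _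
      have hF0 : F = [] := by simpa using hF
      have hG0 : G = [] := by simpa using hG
      rw [show ((P.length : Nat) : Int) = 26 by simp at h26; omega,
        PySem.List.pyRange_one_eq_nil (le_refl 26)]
      subst hF0 hG0
      simp [pvHalf]
  | cons a T ih =>
      intro P L F C G h26 hodd hF hG hn
      have hoddc := pvCountOdd_cons a T
      have ha : a % 2 = 0 := by rw [hoddc] at hodd; split_ifs at hodd; omega
      have hoddT : pvCountOdd T = 0 := by rw [hoddc] at hodd; omega
      have hsum : (a :: T).sum = a + T.sum := by simp
      have hlt : ((P.length : Nat) : Int) < 26 := by simp at h26; omega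
      rw [PySem.List.pyRange_one_cons hlt, List.foldl_cons, pvStep_even n P a T _ _ ha]
      rw [pvWrite_loop n (Char.ofNat (P.length + 97)) (a / 2) L (F ++ C ++ G) L.reverse
        (by simp) (by simp; omega) (by simp at hn ⊢; omega)]
      dsimp only
      have hm : a / 2 ≤ F.length := by omega
      have hMid : ((F ++ C ++ G).drop (a / 2)).take ((F ++ C ++ G).length - 2 * (a / 2))
          = F.drop (a / 2) ++ (C ++ G.take (G.length - a / 2)) := by
        rw [List.append_assoc, List.drop_append_of_le_length hm,
          show (F ++ (C ++ G)).length - 2 * (a / 2)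
            = (F.drop (a / 2)).length + (C.length + (G.length - a / 2)) by simp; omega,
          List.take_length_add_append, List.take_length_add_append]
      rw [hMid]
      have hx : (L ++ List.replicate (a / 2) (Char.ofNat (P.length + 97)))
            ++ (F.drop (a / 2) ++ (C ++ G.take (G.length - a / 2)))
            ++ (List.replicate (a / 2) (Char.ofNat (P.length + 97)) ++ L.reverse)
          = (L ++ List.replicate (a / 2) (Char.ofNat (P.length + 97)))
            ++ (F.drop (a / 2) ++ C ++ G.take (G.length - a / 2))
            ++ (L ++ List.replicate (a / 2) (Char.ofNat (P.length + 97))).reverse := by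
        simp [List.append_assoc, List.reverse_append]
      rw [hx,
        show L.length + a / 2
          = (L ++ List.replicate (a / 2) (Char.ofNat (P.length + 97))).length by simp,
        show P ++ a :: T = (P ++ [a]) ++ T by simp,
        show ((P.length : Nat) : Int) + 1 = (((P ++ [a]).length : Nat) : Int) by simp]
      rw [ih (P ++ [a]) (L ++ List.replicate (a / 2) (Char.ofNat (P.length + 97)))
        (F.drop (a / 2)) C (G.take (G.length - a / 2))
        (by simp at h26 ⊢; omega) hoddT
        (by simp at hF ⊢; omega)
        (by simp at hG ⊢; omega)
        (by simp at hn ⊢; omega)]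
      rw [show (P ++ [a]).length = P.length + 1 by simp, pvHalf]
      simp [List.append_assoc, List.reverse_append, List.reverse_replicate]

lemma pvMain_aux (n : Nat) :
    ∀ (S P : List Nat) (L M : List Char),
      P.length + S.length = 26 → pvCountOdd S ≤ 1 → S.sum = M.length →
      n = 2 * L.length + M.length →
      ((PySem.List.pyRange (P.length : Int) 26 1).foldl (pvStep n)
          (L ++ M ++ L.reverse, P ++ S, L.length)).1
        = L ++ pvHalf P.length S ++ pvMid P.length S ++ (pvHalf P.length S).reverse ++ L.reverse := by
  intro S
  induction S with
  | nil =>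
      intro P L M h26 _ hsum _
      have hM0 : M = [] := List.eq_nil_of_length_eq_zero (by simp at hsum; omega)
      rw [show ((P.length : Nat) : Int) = 26 by simp at h26; omega,
        PySem.List.pyRange_one_eq_nil (le_refl 26)]
      subst hM0
      simp [pvHalf, pvMid]
  | cons a T ih =>
      intro P L M h26 hodd hsum hn
      have hoddc := pvCountOdd_cons a T
      have hsum' : a + T.sum = M.length := by simp at hsum; omega
      have hlt : ((P.length : Nat) : Int) < 26 := by simp at h26; omega
      rw [PySem.List.pyRange_one_cons hlt, List.foldl_cons]
      by_cases ha : a % 2 = 0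
      · -- even head: a/2 pair writes, then induction
        rw [pvStep_even n P a T _ _ ha]
        rw [pvWrite_loop n (Char.ofNat (P.length + 97)) (a / 2) L M L.reverse
          (by simp) (by omega) (by simp at hn ⊢; omega)]
        dsimp only
        have hx : (L ++ List.replicate (a / 2) (Char.ofNat (P.length + 97)))
              ++ (M.drop (a / 2)).take (M.length - 2 * (a / 2))
              ++ (List.replicate (a / 2) (Char.ofNat (P.length + 97)) ++ L.reverse)
            = (L ++ List.replicate (a / 2) (Char.ofNat (P.length + 97)))
              ++ (M.drop (a / 2)).take (M.length - 2 * (a / 2))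
              ++ (L ++ List.replicate (a / 2) (Char.ofNat (P.length + 97))).reverse := by
          simp [List.append_assoc, List.reverse_append]
        rw [hx,
          show L.length + a / 2
            = (L ++ List.replicate (a / 2) (Char.ofNat (P.length + 97))).length by simp,
          show P ++ a :: T = (P ++ [a]) ++ T by simp,
          show ((P.length : Nat) : Int) + 1 = (((P ++ [a]).length : Nat) : Int) by simp]
        rw [ih (P ++ [a]) (L ++ List.replicate (a / 2) (Char.ofNat (P.length + 97)))
          ((M.drop (a / 2)).take (M.length - 2 * (a / 2)))
          (by simp at h26 ⊢; omega)
          (by rw [hoddc, if_neg (by omega)] at hodd; omega)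
          (by simp [List.length_take, List.length_drop]; omega)
          (by simp [List.length_take, List.length_drop] at hn ⊢; omega)]
        rw [show (P ++ [a]).length = P.length + 1 by simp, pvHalf, pvMid,
          if_neg (by omega : ¬ a % 2 ≠ 0)]
        simp [List.append_assoc, List.reverse_append, List.reverse_replicate]
      · -- odd head: the mid write plus the all-even lemma
        have ha' : a % 2 = 1 := by omega
        have hoddT : pvCountOdd T = 0 := by rw [hoddc, if_pos (by omega)] at hodd; omega
        have hTpar : T.sum % 2 = 0 := by have := pvCountOdd_sum_parity T; omega
        have hModd : M.length % 2 = 1 := by omega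
        rw [pvStep_odd n P a T _ _ ha']
        have hfd : PySem.Int.floordiv (n : Int) 2 = ((n / 2 : Nat) : Int) := by
          exact_mod_cast PySem.Int.floordiv_natCast n 2
        have e1 : PySem.List.slice (L ++ M ++ L.reverse) none (some (PySem.Int.floordiv (n : Int) 2))
            = L ++ M.take (M.length / 2) := by
          rw [hfd, PySem.List.slice_to_natCast, List.append_assoc,
            show n / 2 = L.length + M.length / 2 by omega,
            List.take_length_add_append, List.take_append_of_le_length (by omega)]
        have e2 : PySem.List.slice (L ++ M ++ L.reverse)
              (some (PySem.Int.floordiv (n : Int) 2 + 1)) none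
            = M.drop (M.length / 2 + 1) ++ L.reverse := by
          rw [hfd, show (((n / 2 : Nat) : Int) + 1) = ((n / 2 + 1 : Nat) : Int) by push_cast; ring,
            PySem.List.slice_from_natCast, List.append_assoc,
            show n / 2 + 1 = L.length + (M.length / 2 + 1) by omega,
            List.drop_length_add_append, List.drop_append_of_le_length (by omega)]
        rw [e1, e2]
        have hx : (L ++ M.take (M.length / 2)) ++ [Char.ofNat (P.length + 97)] ++
              (M.drop (M.length / 2 + 1) ++ L.reverse)
            = L ++ (M.take (M.length / 2) ++ [Char.ofNat (P.length + 97)]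
                ++ M.drop (M.length / 2 + 1)) ++ L.reverse := by
          simp [List.append_assoc]
        rw [hx, ← List.foldl_cons, ← PySem.List.pyRange_one_cons hlt]
        rw [pvEven_aux n ((a - 1) :: T) P L (M.take (M.length / 2)) [Char.ofNat (P.length + 97)]
          (M.drop (M.length / 2 + 1))
          (by simp at h26 ⊢; omega)
          (by rw [pvCountOdd_cons, if_neg (by omega)]; omega)
          (by simp [List.length_take]; omega)
          (by simp [List.length_drop]; omega)
          (by simp [List.length_take, List.length_drop]; omega)]
        rw [pvHalf, pvHalf, pvMid, if_pos (by omega : a % 2 ≠ 0), pvMid_eq_nil _ _ hoddT,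
          show (a - 1) / 2 = a / 2 by omega]
        simp [List.append_assoc]

-- ===== VERDICT (by name: the statement is the Claim_ definition above) =====
theorem findResultantString_spec : Claim_equal_findResultantString := by
  intro s _ hpre
  unfold Spec_findResultantString findResultantString findResultantString_alt
  dsimp only
  have hpre' : ∀ c ∈ s.toList, 71 ≤ c.toNat ∧ c.toNat ≤ 122 := by
    intro c hc
    have := List.all_eq_true.mp hpre c hc
    simp at this
    omega
  obtain ⟨h26, hsum⟩ := pvCountLoop_spec s.toList hpre'
  rw [pvBCount_eq s.toList hpre']
  have hOddCount : pvOddCount (pvCountLoop s.toList) = pvCountOdd (pvCountLoop s.toList) := by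
    unfold pvOddCount
    simpa using pvOdd_aux (pvCountLoop s.toList) [] (pvCountLoop s.toList) 0 (by simp) h26
  have hfilter : (List.range 26).filter (fun i => (pvCountLoop s.toList).getD i 0 % 2 != 0)
      = pvOddIdxs 0 (pvCountLoop s.toList) := by
    have h := pvFilter_eq (pvCountLoop s.toList) (pvCountLoop s.toList) [] (by simp)
    simp only [List.length_nil] at h
    rw [List.range_eq_range', show (26 : Nat) = (pvCountLoop s.toList).length from h26.symm]
    exact h
  rw [hfilter, pvOddIdxs_length (pvCountLoop s.toList) 0]
  have hOlen : (pvOddIdxs 0 (pvCountLoop s.toList)).length = pvCountOdd (pvCountLoop s.toList) :=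
    pvOddIdxs_length (pvCountLoop s.toList) 0
  -- A's adjusted array, in closed form
  have hadj : pvAdjusted s.toList
      = pvDecL (pvIncRun (pvCountLoop s.toList) (pvCountOdd (pvCountLoop s.toList) / 2)).1
          (pvCountOdd (pvCountLoop s.toList) / 2) := by
    rw [pvAdjusted_eq s.toList h26, hOddCount]
  rw [hadj]
  have hX26 : (pvIncRun (pvCountLoop s.toList) (pvCountOdd (pvCountLoop s.toList) / 2)).1.length
      = 26 := by rw [pvIncRun_length]; exact h26
  have hOX : pvOddIdxs 0 (pvIncRun (pvCountLoop s.toList) (pvCountOdd (pvCountLoop s.toList) / 2)).1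
      = (pvOddIdxs 0 (pvCountLoop s.toList)).drop (pvCountOdd (pvCountLoop s.toList) / 2) :=
    pvOddIdxs_pvIncRun (pvCountLoop s.toList) 0 (pvCountOdd (pvCountLoop s.toList) / 2)
  have hcoX : pvCountOdd (pvIncRun (pvCountLoop s.toList) (pvCountOdd (pvCountLoop s.toList) / 2)).1
      = pvCountOdd (pvCountLoop s.toList) - pvCountOdd (pvCountLoop s.toList) / 2 := by
    rw [← pvOddIdxs_length _ 0, hOX, List.length_drop, hOlen]
  have hOAD : pvOddIdxs 0 (pvDecL (pvIncRun (pvCountLoop s.toList) (pvCountOdd (pvCountLoop s.toList) / 2)).1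
        (pvCountOdd (pvCountLoop s.toList) / 2))
      = ((pvOddIdxs 0 (pvCountLoop s.toList)).drop (pvCountOdd (pvCountLoop s.toList) / 2)).take
          (pvCountOdd (pvCountLoop s.toList) % 2) := by
    rw [pvOddIdxs_pvDecL, hOX, List.length_drop, hOlen,
      show pvCountOdd (pvCountLoop s.toList) - pvCountOdd (pvCountLoop s.toList) / 2
            - pvCountOdd (pvCountLoop s.toList) / 2
          = pvCountOdd (pvCountLoop s.toList) % 2 by omega]
  have hAD26 : (pvDecL (pvIncRun (pvCountLoop s.toList) (pvCountOdd (pvCountLoop s.toList) / 2)).1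
      (pvCountOdd (pvCountLoop s.toList) / 2)).length = 26 := by
    rw [pvDecL_length, hX26]
  have hcoAD : pvCountOdd (pvDecL (pvIncRun (pvCountLoop s.toList) (pvCountOdd (pvCountLoop s.toList) / 2)).1
      (pvCountOdd (pvCountLoop s.toList) / 2)) ≤ 1 := by
    rw [← pvOddIdxs_length _ 0, hOAD]
    simp only [List.length_take]
    omega
  have hsumX : (pvIncRun (pvCountLoop s.toList) (pvCountOdd (pvCountLoop s.toList) / 2)).1.sum
      = (pvCountLoop s.toList).sum + pvCountOdd (pvCountLoop s.toList) / 2 := by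
    rw [pvIncRun_sum]
    omega
  have hsumAD : (pvDecL (pvIncRun (pvCountLoop s.toList) (pvCountOdd (pvCountLoop s.toList) / 2)).1
      (pvCountOdd (pvCountLoop s.toList) / 2)).sum = s.toList.length := by
    have h := pvDecL_sum (pvIncRun (pvCountLoop s.toList) (pvCountOdd (pvCountLoop s.toList) / 2)).1
      (pvCountOdd (pvCountLoop s.toList) / 2)
    rw [hcoX, hsumX] at h
    omega
  -- A's whole computation
  have hmain := pvMain_aux s.toList.length
    (pvDecL (pvIncRun (pvCountLoop s.toList) (pvCountOdd (pvCountLoop s.toList) / 2)).1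
      (pvCountOdd (pvCountLoop s.toList) / 2)) [] [] s.toList
    (by simpa using hAD26) hcoAD (by simpa using hsumAD) (by simp)
  simp only [List.nil_append, List.append_nil, List.length_nil, Nat.cast_zero,
    List.reverse_nil] at hmain
  rw [hmain]
  -- B's left half is A's
  have hleft : (List.range 26).flatMap
        (fun i => List.replicate
          ((pvCountLoop s.toList).getD i 0 / 2 +
            (if i ∈ (pvOddIdxs 0 (pvCountLoop s.toList)).take (pvCountOdd (pvCountLoop s.toList) / 2)
              then 1 else 0))
          (Char.ofNat (i + 97)))
      = pvHalf 0 (pvDecL (pvIncRun (pvCountLoop s.toList) (pvCountOdd (pvCountLoop s.toList) / 2)).1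
          (pvCountOdd (pvCountLoop s.toList) / 2)) := by
    rw [List.range_eq_range', show (26 : Nat) = (pvCountLoop s.toList).length from h26.symm]
    have h := pvLeft_bridge (pvCountLoop s.toList) (pvCountLoop s.toList) []
      (pvCountOdd (pvCountLoop s.toList) / 2) (by simp)
    simp only [List.length_nil] at h
    exact h.trans (by
      rw [← pvHalf_pvIncRun (pvCountLoop s.toList) 0 (pvCountOdd (pvCountLoop s.toList) / 2),
        pvHalf_pvDecL])
  rw [hleft]
  -- B's middle is A's
  have hmid : (if pvCountOdd (pvCountLoop s.toList) % 2 ≠ 0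
        then [Char.ofNat ((pvOddIdxs 0 (pvCountLoop s.toList)).getD
          (pvCountOdd (pvCountLoop s.toList) / 2) 0 + 97)]
        else [])
      = pvMid 0 (pvDecL (pvIncRun (pvCountLoop s.toList) (pvCountOdd (pvCountLoop s.toList) / 2)).1
          (pvCountOdd (pvCountLoop s.toList) / 2)) := by
    rw [pvMid_eq_map, hOAD]
    by_cases hm : pvCountOdd (pvCountLoop s.toList) % 2 = 0
    · rw [if_neg (by omega), hm]
      simp
    · have hm1 : pvCountOdd (pvCountLoop s.toList) % 2 = 1 := by omega
      have hk : pvCountOdd (pvCountLoop s.toList) / 2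
          < (pvOddIdxs 0 (pvCountLoop s.toList)).length := by rw [hOlen]; omega
      rw [if_pos (by omega), hm1,
        List.drop_eq_getElem_cons hk, List.take_succ_cons, List.take_zero, List.map_cons,
        List.map_nil, List.getD_eq_getElem _ 0 hk]
  rw [hmid]
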